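-- pv_equiv track=rewrite | github.com/Mlorenz12/TweetGenerator | test.py | process_data
-- ===== SOURCE A (Python) =====
-- def process_data(data):
--     '''
--     data: string of unprocessed text input
--     '''
--     data = data.split(' ')
--     #preparation of data, removing special characters from beginning and ending of words
--     data = [word.strip('\n') for word in data]
--     #nach Satzzeichen im Satzflow checken (hier mal noch was einfügen)
--     for word in data:
--         if word.startswith('"'):
--             pass
--         if word.endswith('"'):
--             pass
--             if word.endswith('?'):
--                 pass
--             elif word.endswith('!'):
--                 pass
--             else:
--                 pass
--         if word.endswith(','):
--             pass
--         elif word.endswith('.'):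
--             pass
--     data = [word.strip(',') for word in data]
--     data = [word.strip('?') for word in data]
--     data = [word.strip('!') for word in data]
--     data = [word.strip('.') for word in data]
--     data = [word.strip('."') for word in data]
--     data = [word.strip('?"') for word in data]
--     data = [word.strip('!"') for word in data]
--     data = [word for word in data if word != '']#remove empty strings
--     return data
-- ===== SOURCE B (Python) =====
-- def process_data(data):
--     '''
--     data: string of unprocessed text input
--     '''
--     out = []
--     for word in data.split(' '):
--         # trim each word in place with two index pointers instead of
--         # building stripped copies: for each charset, in the original
--         # strip order, advance the left pointer past leading members and
--         # pull the right pointer back past trailing members.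
--         i, j = 0, len(word)
--         for cs in ('\n', ',', '?', '!', '.', '."', '?"', '!"'):
--             while i < j and word[i] in cs:
--                 i += 1
--             while i < j and word[j - 1] in cs:
--                 j -= 1
--         if i < j:
--             out.append(word[i:j])
--     return out
-- ===== Notes on version B (the rewrite author's own statement) =====
-- stated objective: alternative
-- what changed: Replaces A's eight successive list-comprehension passes that each allocate stripped string copies (plus a dead all-pass loop) with a single pass that trims every word in place using two index pointers moved through the charsets, slicing the word once at the end and appending only non-empty results.
import Mathlib
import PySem

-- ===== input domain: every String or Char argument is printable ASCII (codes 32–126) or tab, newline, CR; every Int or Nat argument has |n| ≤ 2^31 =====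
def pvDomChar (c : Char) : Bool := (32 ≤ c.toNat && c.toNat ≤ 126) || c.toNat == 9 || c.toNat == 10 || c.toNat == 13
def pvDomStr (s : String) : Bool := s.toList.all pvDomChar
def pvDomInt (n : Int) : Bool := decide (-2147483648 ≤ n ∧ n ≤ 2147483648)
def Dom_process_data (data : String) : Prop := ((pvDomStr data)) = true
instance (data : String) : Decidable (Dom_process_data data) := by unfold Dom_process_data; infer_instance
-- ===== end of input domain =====

-- B trims each word with two index pointers in one pass instead of A's eight list passes of string strips (objective: alternative); return value only.

-- ===== PORT A =====
def process_data (data : String) : List String :=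
  let d0 := (PySem.Str.split? data " ").getD []
  let d1 := d0.map (fun w => PySem.Str.stripChars w "\n")
  -- the 'for word in data: …' loop of A has a body of only 'pass' statements: no effect
  let d2 := d1.map (fun w => PySem.Str.stripChars w ",")
  let d3 := d2.map (fun w => PySem.Str.stripChars w "?")
  let d4 := d3.map (fun w => PySem.Str.stripChars w "!")
  let d5 := d4.map (fun w => PySem.Str.stripChars w ".")
  let d6 := d5.map (fun w => PySem.Str.stripChars w ".\"")
  let d7 := d6.map (fun w => PySem.Str.stripChars w "?\"")
  let d8 := d7.map (fun w => PySem.Str.stripChars w "!\"")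
  d8.filter (fun w => w != "")

-- ===== PORT B =====
-- 'while i < j and word[i] in cs: i += 1'  (indexing a word within [0, len) ported via toList.getD)
def pvAdvFront (w : List Char) (cs : List Char) (i j : Nat) : Nat :=
  if i < j ∧ cs.contains (w.getD i ' ') then pvAdvFront w cs (i + 1) j else i
termination_by j - i
decreasing_by omega

-- 'while i < j and word[j - 1] in cs: j -= 1'
def pvAdvBack (w : List Char) (cs : List Char) (i j : Nat) : Nat :=
  if i < j ∧ cs.contains (w.getD (j - 1) ' ') then pvAdvBack w cs i (j - 1) else j
termination_by j
decreasing_by omega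

def pvSets : List (List Char) :=
  [['\n'], [','], ['?'], ['!'], ['.'], ['.', '"'], ['?', '"'], ['!', '"']]

-- the loop body: trim one word with the pointer pair, append its slice if non-empty
def pvWordStep (out : List String) (word : String) : List String :=
  let w := word.toList
  let ij := pvSets.foldl
    (fun (ij : Nat × Nat) cs =>
      let i' := pvAdvFront w cs ij.1 ij.2
      (i', pvAdvBack w cs i' ij.2))
    (0, w.length)
  -- 'word[i:j]' with 0 ≤ i ≤ j ≤ len(word) is the take/drop segment
  if ij.1 < ij.2 then out ++ [String.ofList ((w.drop ij.1).take (ij.2 - ij.1))] else out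

def process_data_alt (data : String) : List String :=
  ((PySem.Str.split? data " ").getD []).foldl pvWordStep []

-- ===== PRECONDITION & SPEC =====
def Spec_process_data (data : String) (out : List String) : Prop := out = process_data_alt data
instance (data : String) (out : List String) : Decidable (Spec_process_data data out) := by unfold Spec_process_data; infer_instance

-- ===== CLAIM (what is proved, stated in full; the proofs are below) =====
def Claim_equal_process_data : Prop := ∀ (data : String), Dom_process_data data → Spec_process_data data (process_data data)

-- ===== LEMMAS AND PROOFS =====

theorem pvTakeWhile_length_le {α : Type} (p : α → Bool) (l : List α) :
    (l.takeWhile p).length ≤ l.length := by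
  induction l with
  | nil => simp
  | cons a l ih =>
    by_cases h : p a <;> simp [h]
    exact ih

theorem pvDropWhile_eq_drop {α : Type} (p : α → Bool) (l : List α) :
    l.dropWhile p = l.drop (l.takeWhile p).length := by
  induction l with
  | nil => simp
  | cons a l ih => by_cases h : p a <;> simp [h, ih]

-- pvAdvFront reaches the end of the leading run of cs-members in the segment [i, j)
theorem pvAdvFront_eq (w cs : List Char) (i j : Nat) (hj : j ≤ w.length) :
    pvAdvFront w cs i j
      = i + (((w.drop i).take (j - i)).takeWhile (fun c => cs.contains c)).length := by
  fun_induction pvAdvFront w cs i j with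
  | case1 i h ih =>
    obtain ⟨hlt, hmem⟩ := h
    have hi : i < w.length := lt_of_lt_of_le hlt hj
    have hdrop : w.drop i = w[i] :: w.drop (i + 1) := List.drop_eq_getElem_cons hi
    have hji : j - i = (j - (i + 1)) + 1 := by omega
    have hg : w.getD i ' ' = w[i] := List.getD_eq_getElem w ' ' hi
    rw [ih, hdrop, hji]
    simp only [List.take_succ_cons, List.takeWhile_cons, hg ▸ hmem]
    simp; omega
  | case2 i h =>
    by_cases hlt : i < j
    · have hi : i < w.length := lt_of_lt_of_le hlt hj
      have hdrop : w.drop i = w[i] :: w.drop (i + 1) := List.drop_eq_getElem_cons hi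
      have hji : j - i = (j - (i + 1)) + 1 := by omega
      have hmem : w[i] ∉ cs := by
        intro hm
        exact h ⟨hlt, by rw [List.getD_eq_getElem w ' ' hi]; simpa using hm⟩
      rw [hdrop, hji]
      simp [hmem]
    · have hz : j - i = 0 := by omega
      simp [hz]

-- pvAdvBack strips the trailing run of cs-members in the segment [i, j)
theorem pvAdvBack_eq (w cs : List Char) (i j : Nat) (hj : j ≤ w.length) :
    pvAdvBack w cs i j
      = j - ((((w.drop i).take (j - i)).reverse).takeWhile (fun c => cs.contains c)).length := by
  induction j using Nat.strong_induction_on with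
  | _ j ih =>
    rw [pvAdvBack]
    by_cases h : i < j ∧ cs.contains (w.getD (j - 1) ' ') = true
    · obtain ⟨hlt, hmem⟩ := h
      have hj1 : j - 1 < w.length := by omega
      have hg : w.getD (j - 1) ' ' = w[j - 1] := List.getD_eq_getElem w ' ' hj1
      have hsplit : (w.drop i).take (j - i) = (w.drop i).take ((j - 1) - i) ++ [w[j - 1]] := by
        have hji : j - i = ((j - 1) - i) + 1 := by omega
        have hidx : (w.drop i)[(j - 1) - i]? = some w[j - 1] := by
          rw [List.getElem?_drop]
          have hadd : i + ((j - 1) - i) = j - 1 := by omega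
          rw [hadd, List.getElem?_eq_getElem hj1]
        rw [hji, List.take_add_one, hidx]
        rfl
      have hlen : (((w.drop i).take ((j - 1) - i)).reverse.takeWhile
          (fun c => cs.contains c)).length ≤ (j - 1) - i := by
        calc _ ≤ ((w.drop i).take ((j - 1) - i)).reverse.length := pvTakeWhile_length_le _ _
          _ ≤ (j - 1) - i := by simp [List.length_take]
      rw [if_pos ⟨hlt, hmem⟩, ih (j - 1) (by omega) (by omega), hsplit]
      have hmem' : cs.contains w[j - 1] = true := hg ▸ hmem
      simp only [List.reverse_append, List.reverse_cons, List.reverse_nil, List.nil_append,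
        List.singleton_append, List.takeWhile_cons, hmem', if_true, List.length_cons]
      omega
    · rw [if_neg h]
      by_cases hlt : i < j
      · have hj1 : j - 1 < w.length := by omega
        have hmem : w[j - 1] ∉ cs := by
          intro hm
          exact h ⟨hlt, by rw [List.getD_eq_getElem w ' ' hj1]; simpa using hm⟩
        have hsplit : (w.drop i).take (j - i) = (w.drop i).take ((j - 1) - i) ++ [w[j - 1]] := by
          have hji : j - i = ((j - 1) - i) + 1 := by omega
          have hidx : (w.drop i)[(j - 1) - i]? = some w[j - 1] := by
            rw [List.getElem?_drop]
            have hadd : i + ((j - 1) - i) = j - 1 := by omega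
            rw [hadd, List.getElem?_eq_getElem hj1]
          rw [hji, List.take_add_one, hidx]
          rfl
        rw [hsplit]
        simp [hmem]
      · have hz : j - i = 0 := by omega
        simp [hz]

-- one charset: the pointer step computes stripChars of the current segment
theorem pvStep_eq (w cs : List Char) (i j : Nat) (hij : i ≤ j) (hj : j ≤ w.length) :
    i ≤ pvAdvFront w cs i j ∧
    pvAdvFront w cs i j ≤ pvAdvBack w cs (pvAdvFront w cs i j) j ∧
    pvAdvBack w cs (pvAdvFront w cs i j) j ≤ j ∧
    (w.drop (pvAdvFront w cs i j)).take
        (pvAdvBack w cs (pvAdvFront w cs i j) j - pvAdvFront w cs i j)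
      = PySem.Chars.stripChars ((w.drop i).take (j - i)) cs := by
  set p : Char → Bool := fun c => cs.contains c with hp
  set seg := (w.drop i).take (j - i) with hseg
  have hseglen : seg.length = j - i := by simp [hseg, List.length_take]; omega
  set k := (seg.takeWhile p).length with hk
  have hk_le : k ≤ j - i := hseglen ▸ pvTakeWhile_length_le p seg
  have hfront : pvAdvFront w cs i j = i + k := pvAdvFront_eq w cs i j hj
  have hi' : i + k ≤ j := by omega
  -- segment after the front trim is dropWhile p seg
  have hsegB : (w.drop (i + k)).take (j - (i + k)) = seg.dropWhile p := by
    rw [pvDropWhile_eq_drop, ← hk, hseg, List.drop_take, List.drop_drop]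
    congr 1
    omega
  set segB := seg.dropWhile p with hsegB'
  have hsegBlen : segB.length = j - (i + k) := by
    rw [← hsegB]; simp [List.length_take]; omega
  set t := (segB.reverse.takeWhile p).length with ht
  have ht_le : t ≤ j - (i + k) := by
    calc t ≤ segB.reverse.length := pvTakeWhile_length_le p segB.reverse
      _ = j - (i + k) := by simp [hsegBlen]
  have hback : pvAdvBack w cs (i + k) j = j - t := by
    rw [pvAdvBack_eq w cs (i + k) j hj, hsegB]
  refine ⟨by omega, by rw [hfront, hback]; omega, by rw [hfront, hback]; omega, ?_⟩
  rw [hfront, hback]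
  -- RHS: stripChars seg cs = (dropWhile p segB.reverse).reverse
  show (w.drop (i + k)).take (j - t - (i + k)) = PySem.Chars.stripChars seg cs
  have hrhs : PySem.Chars.stripChars seg cs = (segB.reverse.dropWhile p).reverse := by
    simp [PySem.Chars.stripChars, hsegB', hp]
  rw [hrhs, pvDropWhile_eq_drop, ← ht, List.reverse_drop, List.reverse_reverse,
      List.length_reverse, hsegBlen, ← hsegB, List.take_take]
  congr 1
  omega

-- the fold over the charsets computes the chained stripChars of the segment
theorem pvFoldSets_eq (w : List Char) (sets : List (List Char)) :
    ∀ (i j : Nat), i ≤ j → j ≤ w.length →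
    let ij := sets.foldl (fun (ij : Nat × Nat) cs =>
        let i' := pvAdvFront w cs ij.1 ij.2
        (i', pvAdvBack w cs i' ij.2)) (i, j)
    ij.1 ≤ ij.2 ∧ ij.2 ≤ w.length ∧
    (w.drop ij.1).take (ij.2 - ij.1)
      = sets.foldl (fun s cs => PySem.Chars.stripChars s cs) ((w.drop i).take (j - i)) := by
  induction sets with
  | nil => intro i j hij hj; exact ⟨hij, hj, rfl⟩
  | cons cs sets ih =>
    intro i j hij hj
    obtain ⟨h1, h2, h3, h4⟩ := pvStep_eq w cs i j hij hj
    have := ih (pvAdvFront w cs i j) (pvAdvBack w cs (pvAdvFront w cs i j) j) h2 (le_trans h3 hj)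
    simp only [List.foldl_cons]
    obtain ⟨g1, g2, g3⟩ := this
    exact ⟨g1, g2, by rw [g3, h4]⟩

-- A's per-word strip chain, as one function
def pvChainA (word : String) : String :=
  PySem.Str.stripChars (PySem.Str.stripChars (PySem.Str.stripChars (PySem.Str.stripChars
    (PySem.Str.stripChars (PySem.Str.stripChars (PySem.Str.stripChars (PySem.Str.stripChars
      word "\n") ",") "?") "!") ".") ".\"") "?\"") "!\""

theorem pvChainA_eq (word : String) :
    pvChainA word = String.ofList
      (pvSets.foldl (fun s cs => PySem.Chars.stripChars s cs) word.toList) := by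
  simp [pvChainA, PySem.Str.stripChars, pvSets, List.foldl_cons]

-- B's body for one word equals "append A's chained strip if non-empty"
theorem pvWordStep_eq (out : List String) (word : String) :
    pvWordStep out word = if pvChainA word != "" then out ++ [pvChainA word] else out := by
  simp only [pvWordStep]
  obtain ⟨h1, h2, h3⟩ := pvFoldSets_eq word.toList pvSets 0 word.toList.length (Nat.zero_le _) le_rfl
  set ij := pvSets.foldl (fun (ij : Nat × Nat) cs =>
      let i' := pvAdvFront word.toList cs ij.1 ij.2
      (i', pvAdvBack word.toList cs i' ij.2)) (0, word.toList.length) with hij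
  simp only [List.drop_zero, Nat.sub_zero, List.take_length] at h3
  have hchain : pvChainA word = String.ofList ((word.toList.drop ij.1).take (ij.2 - ij.1)) := by
    rw [pvChainA_eq, ← h3]
  have hlen : ((word.toList.drop ij.1).take (ij.2 - ij.1)).length = ij.2 - ij.1 := by
    rw [List.length_take, List.length_drop]; omega
  by_cases hlt : ij.1 < ij.2
  · have hne : pvChainA word ≠ "" := by
      rw [hchain]
      intro hcontra
      have hnil : ((word.toList.drop ij.1).take (ij.2 - ij.1)) = [] := by
        have := congrArg String.toList hcontra
        simpa [String.toList_ofList] using this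
      rw [hnil] at hlen
      simp at hlen
      omega
    have hne' : String.ofList ((word.toList.drop ij.1).take (ij.2 - ij.1)) ≠ "" := hchain ▸ hne
    simp [if_pos hlt, hchain, hne']
  · have hemp : ((word.toList.drop ij.1).take (ij.2 - ij.1)) = [] := by
      have hz : ij.2 - ij.1 = 0 := by omega
      rw [hz, List.take_zero]
    have heq : pvChainA word = "" := by rw [hchain, hemp]
    simp [if_neg hlt, heq]

theorem pvFoldWords_eq (ws : List String) (acc : List String) :
    ws.foldl pvWordStep acc = acc ++ (ws.map pvChainA).filter (fun w => w != "") := by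
  induction ws generalizing acc with
  | nil => simp
  | cons word ws ih =>
    simp only [List.foldl_cons, List.map_cons, List.filter_cons]
    rw [pvWordStep_eq]
    by_cases h : pvChainA word != ""
    · simp only [if_pos h, ih]
      simp
    · simp only [if_neg h, ih]

-- ===== VERDICT (by name: the statement is the Claim_ definition above) =====
theorem process_data_spec : Claim_equal_process_data := by
  intro data _
  show process_data data = process_data_alt data
  unfold process_data process_data_alt
  rw [pvFoldWords_eq]
  simp only [List.nil_append, List.map_map, Function.comp_def]
  rfl
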